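-- pv_equiv track=rewrite | github.com/johnsbuck/AdventOfCode | 2020/3/main_3.py | get_solution_3b
-- ===== SOURCE A (Python) =====
-- def get_solution_3b(patterns: 'list[str]') -> int:
--     total = 1
--     for inc in [1, 3, 5, 7]:
--         k = 0
--         count = 0
--         for i in range(1, len(patterns)):
--             k = (k + inc) % len(patterns[0])
--             count += patterns[i][k] == '#'
--         total *= count
--
--     k = 0
--     count = 0
--     for i in range(2, len(patterns), 2):
--         k = (k + 1) % len(patterns[0])
--         count += patterns[i][k] == "#"
--     return total * count
-- ===== SOURCE B (Python) =====
-- def get_solution_3b(patterns: 'list[str]') -> int: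
--     # One fused pass over the rows: a vector of five counters, one per slope,
--     # all updated from the same row using the closed-form column (i//d)*r % w;
--     # the answer is the product of the counters.
--     slopes = [(1, 1), (3, 1), (5, 1), (7, 1), (1, 2)]
--     counts = [0] * len(slopes)
--     for i in range(1, len(patterns)):
--         w = len(patterns[0])
--         row = patterns[i]
--         counts = [c + (i % d == 0 and row[(i // d) * r % w] == '#')
--                   for c, (r, d) in zip(counts, slopes)]
--     total = 1
--     for c in counts:
--         total *= c
--     return total
-- ===== Notes on version B (the rewrite author's own statement) =====
-- stated objective: alternative
-- what changed: Replaces A's five staged traversals (four sequential stateful walks with an accumulated column offset plus a duplicated special-cased loop for the down-2 slope) by one fused pass over the rows that updates a vector of five slope counters simultaneously from the closed-form column (i//d)*r % w, then multiplies the counters.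
import Mathlib
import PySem

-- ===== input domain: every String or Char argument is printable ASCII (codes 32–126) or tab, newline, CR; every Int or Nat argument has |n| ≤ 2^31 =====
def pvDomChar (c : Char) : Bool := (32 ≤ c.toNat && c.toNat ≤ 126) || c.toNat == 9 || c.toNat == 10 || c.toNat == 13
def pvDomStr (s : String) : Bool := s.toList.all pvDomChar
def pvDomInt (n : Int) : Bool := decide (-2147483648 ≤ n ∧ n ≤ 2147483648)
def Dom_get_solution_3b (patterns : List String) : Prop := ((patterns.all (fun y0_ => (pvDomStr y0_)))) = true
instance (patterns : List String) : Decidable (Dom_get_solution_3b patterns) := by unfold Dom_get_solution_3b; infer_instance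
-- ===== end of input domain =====

-- B fuses A's five staged stateful walks (plus a duplicated special-cased final loop) into
-- one pass over the rows updating a vector of five slope counters simultaneously via the
-- closed-form column (objective: alternative, similar cost).

-- ===== PORT A =====
-- patterns[i][k] == '#', counted as 0/1 (indices in range under Pre_; getD is junk-safe outside)
def aHit (patterns : List String) (i k : Nat) : Nat :=
  if (patterns.getD i "").toList.getD k ' ' = '#' then 1 else 0

def get_solution_3b (patterns : List String) : Int :=
  let n := patterns.length
  -- total = 1; for inc in [1,3,5,7]: inner loop over range(1, n) with state (k, count)
  let total : Int := [1, 3, 5, 7].foldl (fun (t : Int) inc =>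
    let s := (List.range' 1 (n - 1) 1).foldl (fun (s : Nat × Nat) i =>
      let k := (s.1 + inc) % (patterns.headD "").length
      (k, s.2 + aHit patterns i k)) (0, 0)
    t * (s.2 : Int)) 1
  -- final loop over range(2, n, 2)
  let s := (List.range' 2 ((n - 1) / 2) 2).foldl (fun (s : Nat × Nat) i =>
    let k := (s.1 + 1) % (patterns.headD "").length
    (k, s.2 + aHit patterns i k)) (0, 0)
  total * (s.2 : Int)

-- ===== PORT B =====
-- slopes = [(1,1),(3,1),(5,1),(7,1),(1,2)]
def slopesB : List (Nat × Nat) := [(1, 1), (3, 1), (5, 1), (7, 1), (1, 2)]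

def get_solution_3b_alt (patterns : List String) : Int :=
  -- counts = [0] * len(slopes)
  let counts : List Int := List.replicate slopesB.length 0
  -- for i in range(1, len(patterns)): counts = [c + (i % d == 0 and row[(i//d)*r % w] == '#') ...]
  let counts := (List.range' 1 (patterns.length - 1) 1).foldl (fun (cs : List Int) i =>
    let w := (patterns.headD "").length
    let row := patterns.getD i ""
    List.zipWith (fun (c : Int) (rd : Nat × Nat) =>
      c + if i % rd.2 = 0 ∧ row.toList.getD (i / rd.2 * rd.1 % w) ' ' = '#' then 1 else 0)
      cs slopesB) counts
  -- total = 1; for c in counts: total *= c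
  counts.foldl (fun (t : Int) c => t * c) 1

-- ===== PRECONDITION & SPEC =====
-- Pre_ excludes exactly the inputs where Python A raises: two or more rows with an empty first
-- row (ZeroDivisionError), or a visited cell outside its (ragged) row (IndexError).
def Pre_get_solution_3b (patterns : List String) : Prop :=
  patterns.length ≤ 1 ∨
    (0 < (patterns.headD "").length ∧
      ∀ i < patterns.length,
        (1 ≤ i → ∀ r ∈ [1, 3, 5, 7],
          (i * r) % (patterns.headD "").length < (patterns.getD i "").length) ∧
        (2 ≤ i → i % 2 = 0 →
          (i / 2) % (patterns.headD "").length < (patterns.getD i "").length))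
instance (patterns : List String) : Decidable (Pre_get_solution_3b patterns) := by
  unfold Pre_get_solution_3b; infer_instance

def pvWitness_get_solution_3b : List String := ["#.", ".#"]

def Spec_get_solution_3b (patterns : List String) (out : Int) : Prop := out = get_solution_3b_alt patterns
instance (patterns : List String) (out : Int) : Decidable (Spec_get_solution_3b patterns out) := by unfold Spec_get_solution_3b; infer_instance

-- ===== CLAIM (what is proved, stated in full; the proofs are below) =====
def Claim_equal_get_solution_3b : Prop := ∀ (patterns : List String), Dom_get_solution_3b patterns → Pre_get_solution_3b patterns → Spec_get_solution_3b patterns (get_solution_3b patterns)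

-- ===== LEMMAS AND PROOFS =====

-- A's stateful loop (k accumulating +r mod w) over range' (d*(j+1)) m d, started at k = j*r % w,
-- counts the same as the closed-form column (i/d*r) % w over the same rows.
theorem key (h : Nat → Nat → Nat) (w r d : Nat) (hd : 0 < d) :
    ∀ (m j c : Nat),
      ((List.range' (d * (j + 1)) m d).foldl
        (fun (s : Nat × Nat) i => ((s.1 + r) % w, s.2 + h i ((s.1 + r) % w))) (j * r % w, c)).2
      = (List.range' (d * (j + 1)) m d).foldl (fun (c : Nat) i => c + h i ((i / d * r) % w)) c := by
  intro m
  induction m with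
  | zero => intro j c; simp [List.range']
  | succ m ih =>
    intro j c
    have hk : (j * r % w + r) % w = (j + 1) * r % w := by
      rw [Nat.mod_add_mod]; ring_nf
    have hdiv : d * (j + 1) / d = j + 1 := Nat.mul_div_cancel_left _ hd
    have hstep : d * (j + 1) + d = d * (j + 1 + 1) := by ring
    simp only [List.range', List.foldl_cons, hk, hdiv, hstep]
    exact ih (j + 1) (c + h (d * (j + 1)) ((j + 1) * r % w))

theorem inner_eq (patterns : List String) (r d m : Nat) (hd : 0 < d) :
    ((List.range' d m d).foldl
      (fun (s : Nat × Nat) i =>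
        let k := (s.1 + r) % (patterns.headD "").length
        (k, s.2 + aHit patterns i k)) (0, 0)).2
    = (List.range' d m d).foldl (fun (c : Nat) i =>
        c + if (patterns.getD i "").toList.getD ((i / d * r) % (patterns.headD "").length) ' ' = '#'
            then 1 else 0) 0 := by
  have := key (aHit patterns) (patterns.headD "").length r d hd m 0 0
  simpa [aHit] using this

-- zipWith merging over the same right list
theorem zipWith_merge {α : Type} (f g : Int → α → Int) :
    ∀ (cs : List Int) (sl : List α),
      List.zipWith f (List.zipWith g cs sl) sl = List.zipWith (fun c rd => f (g c rd) rd) cs sl := by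
  intro cs
  induction cs with
  | nil => intro sl; simp
  | cons c cs ih => intro sl; cases sl with
    | nil => simp
    | cons s sl => simp [ih]

theorem zipWith_fst {α : Type} :
    ∀ (cs : List Int) (sl : List α), cs.length = sl.length →
      List.zipWith (fun (c : Int) (_ : α) => c) cs sl = cs := by
  intro cs
  induction cs with
  | nil => intro sl _; simp
  | cons c cs ih => intro sl h; cases sl with
    | nil => simp at h
    | cons s sl => simp [ih sl (by simpa using h)]

-- a fold of componentwise zipWith additions = componentwise addition of the per-slope sums
theorem foldl_zip_sum {α : Type} (sl : List α) (G : Nat → α → Int) :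
    ∀ (xs : List Nat) (cs : List Int), cs.length = sl.length →
      xs.foldl (fun cs i => List.zipWith (fun c rd => c + G i rd) cs sl) cs
      = List.zipWith (fun c rd => c + (xs.map (fun i => G i rd)).sum) cs sl := by
  intro xs
  induction xs with
  | nil => intro cs h; simp; exact (zipWith_fst cs sl h).symm
  | cons i xs ih =>
    intro cs h
    simp only [List.foldl_cons, List.map_cons, List.sum_cons]
    rw [ih _ (by rw [List.length_zipWith, h, min_self]), zipWith_merge]
    simp only [add_assoc]

-- sum of the even-guarded values over 1..m = sum over the evens 2,4,…
theorem even_sum (f : Nat → Int) :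
    ∀ (m : Nat),
      ((List.range' 1 m 1).map (fun i => if i % 2 = 0 then f i else 0)).sum
      = ((List.range' 2 (m / 2) 2).map f).sum := by
  intro m
  induction m with
  | zero => simp
  | succ m ih =>
    rw [List.range'_concat, List.map_append, List.sum_append, ih]
    by_cases h : (m + 1) % 2 = 0
    · have h2 : (m + 1) / 2 = m / 2 + 1 := by omega
      rw [h2, List.range'_concat, List.map_append, List.sum_append]
      have h3 : 2 + 2 * (m / 2) = 1 + 1 * m := by omega
      simp [h3]
      intro hodd; omega
    · have h2 : (m + 1) / 2 = m / 2 := by omega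
      simp [h2]
      intro heven; omega

-- generic Nat-counting fold, cast to Int
theorem natfold_cast' (g : Nat → Nat) (xs : List Nat) :
    ∀ (a : Nat),
      ((xs.foldl (fun (c : Nat) i => c + g i) a : Nat) : Int)
      = (a : Int) + (xs.map (fun i => ((g i : Nat) : Int))).sum := by
  induction xs with
  | nil => intro a; simp
  | cons x xs ih => intro a; simp only [List.foldl_cons, List.map_cons, List.sum_cons, ih]; push_cast; ring

theorem zipWith_add_replicate {α : Type} (F : α → Int) :
    ∀ (sl : List α),
      List.zipWith (fun (c : Int) rd => c + F rd) (List.replicate sl.length 0) sl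
      = sl.map (fun rd => F rd) := by
  intro sl
  induction sl with
  | nil => simp
  | cons s sl ih => simp [List.replicate, ih]

theorem get_solution_3b_spec : Claim_equal_get_solution_3b := by
  intro patterns _ _
  unfold Spec_get_solution_3b get_solution_3b get_solution_3b_alt
  simp only [List.foldl_cons, List.foldl_nil]
  rw [inner_eq patterns 1 1 _ one_pos, inner_eq patterns 3 1 _ one_pos,
      inner_eq patterns 5 1 _ one_pos, inner_eq patterns 7 1 _ one_pos,
      inner_eq patterns 1 2 _ two_pos]
  rw [natfold_cast', natfold_cast', natfold_cast', natfold_cast', natfold_cast']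
  rw [foldl_zip_sum slopesB
        (fun i rd => if i % rd.2 = 0 ∧
            (patterns.getD i "").toList.getD
              (i / rd.2 * rd.1 % (patterns.headD "").length) ' ' = '#' then 1 else 0)
        (List.range' 1 (patterns.length - 1) 1) (List.replicate slopesB.length 0)
        (by simp)]
  rw [zipWith_add_replicate]
  simp only [slopesB, List.map_cons, List.map_nil, List.foldl_cons, List.foldl_nil,
    Nat.mod_one, Nat.div_one, Nat.mul_one, Nat.cast_ite, Nat.cast_one,
    Nat.cast_zero, zero_add, true_and]
  rw [show (fun i => if i % 2 = 0 ∧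
        (patterns.getD i "").toList.getD (i / 2 % (patterns.headD "").length) ' ' = '#'
        then (1 : Int) else 0)
      = (fun i => if i % 2 = 0 then
          (if (patterns.getD i "").toList.getD (i / 2 % (patterns.headD "").length) ' ' = '#'
           then (1 : Int) else 0) else 0) from
    funext fun i => ite_and _ _ _ _]
  rw [even_sum]
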